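-- pv_equiv track=rewrite | github.com/halton/coco | coco/asr.py | clean_sensevoice_tags
-- ===== SOURCE A (Python) =====
-- def clean_sensevoice_tags(text: str) -> str:
--     """去掉 SenseVoice 输出里的 ``<|zh|><|HAPPY|><|Speech|>`` 等控制标签，只留可读文本。"""
--     if not text:
--         return ""
--     out: list[str] = []
--     i = 0
--     while i < len(text):
--         if text[i] == "<" and "|>" in text[i:]:
--             i = text.index("|>", i) + 2
--             continue
--         out.append(text[i])
--         i += 1
--     return "".join(out).strip()
-- ===== SOURCE B (Python) =====
-- def clean_sensevoice_tags(text: str) -> str: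
--     """去掉 SenseVoice 输出里的 ``<|zh|><|HAPPY|><|Speech|>`` 等控制标签，只留可读文本。"""
--     segs = text.split('|>')
--     parts = []
--     for seg in segs[:-1]:
--         if '<' in seg:
--             # everything from the first '<' up to the closing '|>' is a tag
--             parts.append(seg[:seg.index('<')])
--         else:
--             # a stray '|>' with no opening '<' is ordinary text
--             parts.append(seg + '|>')
--     parts.append(segs[-1])
--     return ''.join(parts).strip()
-- ===== Notes on version B (the rewrite author's own statement) =====
-- stated objective: faster
-- what changed: Replaces A's index-driven character scan (with a fresh substring search of the remaining text at every '<') by one split on the '|>' delimiter and a per-segment rewrite (truncate a non-final segment at its first '<', or keep it with its '|>' if it has none).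
import Mathlib
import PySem

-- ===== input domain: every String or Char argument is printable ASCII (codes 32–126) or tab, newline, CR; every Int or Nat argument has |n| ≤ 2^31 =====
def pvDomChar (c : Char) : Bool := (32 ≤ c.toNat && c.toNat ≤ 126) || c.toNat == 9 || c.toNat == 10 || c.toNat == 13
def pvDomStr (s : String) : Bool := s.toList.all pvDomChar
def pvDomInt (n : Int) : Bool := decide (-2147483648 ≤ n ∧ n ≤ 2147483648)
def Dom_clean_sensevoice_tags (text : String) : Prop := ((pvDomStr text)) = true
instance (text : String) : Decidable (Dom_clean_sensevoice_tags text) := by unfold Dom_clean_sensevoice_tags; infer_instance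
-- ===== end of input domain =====

-- B replaces A's index-driven char scan (a fresh substring search at every '<') by one split on '|>' plus a per-segment rewrite; a timing run measured B faster.

-- ===== PORT A =====
-- A's while loop over the index i, written as recursion on the suffix text[i:]:
-- '"|>" in text[i:]' is Chars.isIn on the suffix; 'i = text.index("|>", i) + 2' makes
-- the new suffix 'suffix.drop (Chars.find suffix "|>" + 2)' (find is relative to the suffix).
def pvAGo : List Char → List Char
  | [] => []
  | c :: rest =>
    if c = '<' ∧ PySem.Chars.isIn ['|', '>'] (c :: rest) = true then
      pvAGo ((c :: rest).drop ((PySem.Chars.find (c :: rest) ['|', '>']).toNat + 2))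
    else
      c :: pvAGo rest
termination_by l => l.length
decreasing_by all_goals (simp; try omega)

def clean_sensevoice_tags (text : String) : String :=
  if text.toList = [] then ""                               -- if not text: return ""
  else String.ofList (PySem.Chars.strip (pvAGo text.toList))  -- "".join(out).strip()

-- ===== PORT B =====
-- one non-final segment of text.split('|>'): seg[:seg.index('<')] if '<' in seg else seg + '|>'
def pvBSeg (seg : List Char) : List Char :=
  if PySem.Chars.isIn ['<'] seg = true then
    PySem.List.slice seg none (some (PySem.Chars.find seg ['<']))
  else
    seg ++ ['|', '>']

-- the loop over segs[:-1] appending pvBSeg of each, then parts.append(segs[-1]), then ''.join(parts)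
def pvBGo : List (List Char) → List Char
  | [] => []
  | [last] => last
  | s :: ss => pvBSeg s ++ pvBGo ss

def clean_sensevoice_tags_alt (text : String) : String :=
  String.ofList (PySem.Chars.strip (pvBGo (PySem.Chars.splitOn text.toList ['|', '>'])))

-- ===== PRECONDITION & SPEC =====
def Spec_clean_sensevoice_tags (text : String) (out : String) : Prop := out = clean_sensevoice_tags_alt text
instance (text : String) (out : String) : Decidable (Spec_clean_sensevoice_tags text out) := by unfold Spec_clean_sensevoice_tags; infer_instance

-- ===== CLAIM (what is proved, stated in full; the proofs are below) =====
def Claim_equal_clean_sensevoice_tags : Prop := ∀ (text : String), Dom_clean_sensevoice_tags text → Spec_clean_sensevoice_tags text (clean_sensevoice_tags text)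

-- ===== LEMMAS AND PROOFS =====

-- proof-side structural form of splitOn on the fixed separator "|>"
def pvSplit : List Char → List (List Char)
  | [] => [[]]
  | c :: rest =>
    if ['|', '>'].isPrefixOf (c :: rest) then
      [] :: pvSplit ((c :: rest).drop 2)
    else
      (pvSplit rest).modifyHead (c :: ·)
termination_by l => l.length
decreasing_by all_goals (simp; try omega)

theorem pvSplit_ne_nil (cs : List Char) : pvSplit cs ≠ [] := by
  induction cs using pvSplit.induct with
  | case1 => simp [pvSplit]
  | case2 c rest h _ => rw [pvSplit]; simp [h]
  | case3 c rest h ih =>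
    rw [pvSplit]
    simp only [h]
    rcases hr : pvSplit rest with _ | ⟨s, ss⟩
    · exact absurd hr ih
    · simp

theorem pvSplitOn_go_spec (fuel : Nat) (cs cur : List Char) (acc : List (List Char))
    (h : cs.length < fuel) :
    PySem.Chars.splitOn.go ['|', '>'] fuel cs cur acc
      = acc.reverse ++ (pvSplit cs).modifyHead (cur.reverse ++ ·) := by
  induction fuel generalizing cs cur acc with
  | zero => omega
  | succ f ih =>
    cases cs with
    | nil =>
      simp [PySem.Chars.splitOn.go, pvSplit]
    | cons c rest =>
      rw [PySem.Chars.splitOn.go]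
      by_cases hp : ['|', '>'].isPrefixOf (c :: rest)
      · rw [if_pos hp]
        rw [ih _ _ _ (by simp at h ⊢; omega)]
        rw [pvSplit, if_pos hp]
        simp
        exact congrFun List.modifyHead_id _
      · rw [if_neg hp]
        rw [ih _ _ _ (by simp at h ⊢; omega)]
        rw [pvSplit, if_neg hp]
        rcases hr : pvSplit rest with _ | ⟨s, ss⟩
        · exact absurd hr (pvSplit_ne_nil rest)
        · simp

theorem pvSplitOn_eq (cs : List Char) :
    PySem.Chars.splitOn cs ['|', '>'] = pvSplit cs := by
  unfold PySem.Chars.splitOn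
  rw [pvSplitOn_go_spec (cs.length + 1) cs [] [] (by omega)]
  simp
  exact congrFun List.modifyHead_id _

-- Chars.find is characterized by 'first occurrence'
theorem pvFind_eq (s sub : List Char) (n : Nat)
    (hpre : sub <+: s.drop n) (hmin : ∀ i < n, ¬ sub <+: s.drop i) :
    PySem.Chars.find s sub = n := by
  have hinf : sub <:+: s := by
    obtain ⟨r, hr⟩ := hpre
    exact ⟨s.take n, r, by rw [List.append_assoc, hr, List.take_append_drop]⟩
  have hf : 0 ≤ PySem.Chars.find s sub := (PySem.Chars.find_nonneg_iff s sub).mpr hinf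
  obtain ⟨h1, h2⟩ := PySem.Chars.find_spec hf
  rcases lt_trichotomy (PySem.Chars.find s sub).toNat n with h | h | h
  · exact absurd h1 (hmin _ h)
  · omega
  · exact absurd hpre (h2 n h)

theorem pvAGo_id (cs : List Char) (h : ¬ ['|', '>'] <:+: cs) : pvAGo cs = cs := by
  induction cs with
  | nil => rw [pvAGo]
  | cons c rest ih =>
    rw [pvAGo, if_neg]
    · rw [ih (fun hr => h (hr.trans (List.suffix_cons c rest).isInfix))]
    · rintro ⟨-, hin⟩
      exact h ((PySem.Chars.isIn_iff_infix _ _).mp hin)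

theorem pvSplit_single (cs : List Char) (h : ¬ ['|', '>'] <:+: cs) : pvSplit cs = [cs] := by
  induction cs with
  | nil => rw [pvSplit]
  | cons c rest ih =>
    rw [pvSplit, if_neg, ih (fun hr => h (hr.trans (List.suffix_cons c rest).isInfix))]
    · simp
    · intro hp
      exact h (List.isPrefixOf_iff_prefix.mp hp).isInfix

theorem pvSplit_first (t : Nat) : ∀ (cs : List Char),
    ['|', '>'] <+: cs.drop t → (∀ i < t, ¬ ['|', '>'] <+: cs.drop i) →
    pvSplit cs = cs.take t :: pvSplit (cs.drop (t + 2)) := by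
  induction t with
  | zero =>
    intro cs hpre _
    simp only [List.drop_zero] at hpre
    obtain ⟨r, hr⟩ := hpre
    subst hr
    rw [pvSplit.eq_def]
    simp
  | succ t ih =>
    intro cs hpre hmin
    cases cs with
    | nil => simp at hpre
    | cons c rest =>
      have hnp : ¬ ['|', '>'].isPrefixOf (c :: rest) = true := by
        intro hp
        exact hmin 0 (by omega) (by rw [List.drop_zero]; exact List.isPrefixOf_iff_prefix.mp hp)
      rw [pvSplit, if_neg hnp]
      rw [ih rest hpre (fun i hi => hmin (i + 1) (by omega) )]
      rfl

theorem pvBSeg_nil : pvBSeg [] = ['|', '>'] := by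
  rw [pvBSeg, if_neg (by decide)]
  rfl

theorem pvBSeg_head_lt (s : List Char) : pvBSeg ('<' :: s) = [] := by
  have hfind : PySem.Chars.find ('<' :: s) ['<'] = ((0 : Nat) : Int) :=
    pvFind_eq _ _ 0 ⟨s, rfl⟩ (by omega)
  rw [pvBSeg, if_pos, hfind, PySem.List.slice_to _ (by simp)]
  · simp
  · exact (PySem.Chars.isIn_iff_infix _ _).mpr ((List.singleton_infix_iff _ _).mpr (by simp))

theorem pvBSeg_cons (c : Char) (s : List Char) (hc : c ≠ '<') :
    pvBSeg (c :: s) = c :: pvBSeg s := by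
  by_cases hin : PySem.Chars.isIn ['<'] s = true
  · have hinf : ['<'] <:+: s := (PySem.Chars.isIn_iff_infix _ _).mp hin
    have hf : 0 ≤ PySem.Chars.find s ['<'] := (PySem.Chars.find_nonneg_iff s _).mpr hinf
    obtain ⟨h1, h2⟩ := PySem.Chars.find_spec hf
    set n := (PySem.Chars.find s ['<']).toNat with hn
    have hfind : PySem.Chars.find (c :: s) ['<'] = ((n + 1 : Nat) : Int) := by
      apply pvFind_eq
      · simpa using h1
      · intro i hi
        match i with
        | 0 =>
          intro hpre
          obtain ⟨r, hr⟩ := hpre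
          simp at hr
          exact hc hr.1.symm
        | (j+1) => exact fun hj => h2 j (by omega) (by simpa using hj)
    have hin' : PySem.Chars.isIn ['<'] (c :: s) = true :=
      (PySem.Chars.isIn_iff_infix _ _).mpr (hinf.trans (List.suffix_cons c s).isInfix)
    have hfs : PySem.Chars.find s ['<'] = (n : Int) := by omega
    rw [pvBSeg, pvBSeg, if_pos hin, if_pos hin', hfind, hfs,
      PySem.List.slice_to _ (by positivity), PySem.List.slice_to _ (by positivity)]
    simp
  · have hninf : ¬ ['<'] <:+: s := fun hh => hin ((PySem.Chars.isIn_iff_infix _ _).mpr hh)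
    have hmem : '<' ∉ s := fun hm => hninf ((List.singleton_infix_iff _ _).mpr hm)
    have hin2 : ¬ PySem.Chars.isIn ['<'] (c :: s) = true := by
      intro hh
      rcases List.mem_cons.mp ((List.singleton_infix_iff _ _).mp
        ((PySem.Chars.isIn_iff_infix _ _).mp hh)) with h | h
      · exact hc h.symm
      · exact hmem h
    rw [pvBSeg, pvBSeg, if_neg hin2, if_neg hin]
    simp

theorem pvMain (cs : List Char) : pvAGo cs = pvBGo (pvSplit cs) := by
  have H : ∀ n, ∀ cs : List Char, cs.length ≤ n → pvAGo cs = pvBGo (pvSplit cs) := by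
    intro n
    induction n using Nat.strong_induction_on with
    | _ n ih =>
      intro cs hlen
      match cs, hlen with
      | [], _ => rw [pvAGo, pvSplit]; rfl
      | c :: rest, hlen =>
        by_cases hcond : c = '<' ∧ PySem.Chars.isIn ['|', '>'] (c :: rest) = true
        · obtain ⟨hc, hin⟩ := hcond
          have hinf := (PySem.Chars.isIn_iff_infix _ _).mp hin
          have hf : 0 ≤ PySem.Chars.find (c :: rest) ['|', '>'] :=
            (PySem.Chars.find_nonneg_iff _ _).mpr hinf
          obtain ⟨h1, h2⟩ := PySem.Chars.find_spec hf
          set t := (PySem.Chars.find (c :: rest) ['|', '>']).toNat with ht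
          have ht1 : 1 ≤ t := by
            by_contra h0
            have ht0 : t = 0 := by omega
            rw [ht0, List.drop_zero] at h1
            obtain ⟨r, hr⟩ := h1
            simp at hr
            rw [hc] at hr
            exact absurd hr.1 (by decide)
          rw [pvAGo, if_pos ⟨hc, hin⟩, pvSplit_first t _ h1 h2]
          rcases hms : pvSplit ((c :: rest).drop (t + 2)) with _ | ⟨m, ms⟩
          · exact absurd hms (pvSplit_ne_nil _)
          · have hseg : (c :: rest).take t = '<' :: rest.take (t - 1) := by
              obtain ⟨t', ht'⟩ : ∃ t', t = t' + 1 := ⟨t - 1, by omega⟩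
              rw [hc, ht']
              simp
            rw [show pvBGo ((c :: rest).take t :: m :: ms)
                  = pvBSeg ((c :: rest).take t) ++ pvBGo (m :: ms) from rfl,
              hseg, pvBSeg_head_lt, List.nil_append, ← hms]
            have hlt : ((c :: rest).drop (t + 2)).length < (c :: rest).length := by
              simp
            exact ih _ (lt_of_lt_of_le hlt hlen) _ le_rfl
        · rw [pvAGo, if_neg hcond]
          by_cases hc : c = '<'
          · have hin : ¬ PySem.Chars.isIn ['|', '>'] (c :: rest) = true :=
              fun hx => hcond ⟨hc, hx⟩
            have hninf : ¬ ['|', '>'] <:+: (c :: rest) :=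
              (PySem.Chars.isIn_eq_false_iff _ _).mp (by simpa using hin)
            rw [pvSplit_single _ hninf,
              pvAGo_id rest (fun hr => hninf (hr.trans (List.suffix_cons c rest).isInfix))]
            rfl
          · by_cases hp : ['|', '>'].isPrefixOf (c :: rest) = true
            · obtain ⟨r2, hr2⟩ := List.isPrefixOf_iff_prefix.mp hp
              simp at hr2
              obtain ⟨hc2, hrest⟩ := hr2
              subst hc2
              subst hrest
              rw [pvSplit_first 0 _ (by rw [List.drop_zero]; exact List.isPrefixOf_iff_prefix.mp hp) (by omega)]
              rcases hms : pvSplit (('|' :: '>' :: r2).drop (0 + 2)) with _ | ⟨m, ms⟩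
              · exact absurd hms (pvSplit_ne_nil _)
              · rw [List.take_zero,
                  show pvBGo ([] :: m :: ms) = pvBSeg [] ++ pvBGo (m :: ms) from rfl,
                  pvBSeg_nil, ← hms]
                have hdrop : ('|' :: '>' :: r2).drop (0 + 2) = r2 := rfl
                rw [hdrop, pvAGo, if_neg (by rintro ⟨h, -⟩; exact absurd h (by decide))]
                have hrec : pvAGo r2 = pvBGo (pvSplit r2) :=
                  ih r2.length (lt_of_lt_of_le (by simp) hlen) r2 le_rfl
                rw [hrec]
                rfl
            · rw [pvSplit, if_neg hp]
              have hrec : pvAGo rest = pvBGo (pvSplit rest) :=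
                ih rest.length (lt_of_lt_of_le (by simp) hlen) rest le_rfl
              rcases hms : pvSplit rest with _ | ⟨s0, ss⟩
              · exact absurd hms (pvSplit_ne_nil _)
              · cases ss with
                | nil =>
                  rw [hms] at hrec
                  simp only [List.modifyHead]
                  rw [hrec]
                  rfl
                | cons s1 ss' =>
                  rw [hms] at hrec
                  simp only [List.modifyHead]
                  rw [show pvBGo ((c :: s0) :: s1 :: ss') = pvBSeg (c :: s0) ++ pvBGo (s1 :: ss') from rfl,
                    pvBSeg_cons c s0 hc, hrec]
                  rfl
  exact H cs.length cs le_rfl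

-- ===== VERDICT (by name: the statement is the Claim_ definition above) =====
theorem clean_sensevoice_tags_spec : Claim_equal_clean_sensevoice_tags := by
  intro text _
  unfold Spec_clean_sensevoice_tags clean_sensevoice_tags clean_sensevoice_tags_alt
  rw [pvSplitOn_eq, ← pvMain]
  split
  · rename_i h
    rw [h, show pvAGo [] = [] from by rw [pvAGo]]
    rfl
  · rfl
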